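-- pv_equiv track=rewrite | github.com/arkworks-rs/algebra | scripts/test_vectors.py | convert_int_to_byte_vec
-- ===== SOURCE A (Python) =====
-- def convert_int_to_byte_vec(number):
--     s = bin(number)[2:]
--     num_bytes = int((len(s) + 7) / 8)
--     s = s.zfill(num_bytes * 8)
--
--     byte_arr = []
--     for i in range(num_bytes):
--         byte = s[i * 8 : (i + 1) * 8]
--         i = int(byte, 2)
--         byte_arr += [str(i) + "u8"]
--
--     data = ", ".join(byte_arr)
--     return "vec![" + data + "]"
-- ===== SOURCE B (Python) =====
-- def convert_int_to_byte_vec(number):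
--     num_bytes = max(1, (number.bit_length() + 7) // 8)
--     data = ", ".join(f"{b}u8" for b in number.to_bytes(num_bytes, "big"))
--     return "vec![" + data + "]"
-- ===== Notes on version B (the rewrite author's own statement) =====
-- stated objective: idiomatic
-- what changed: B computes the byte values arithmetically with bit_length() and to_bytes() instead of A's building a binary string with bin(), zero-filling it and parsing 8-character slices back with int(s, 2).
-- outside the precondition, e.g. on convert_int_to_byte_vec(-44): A returns 'vec![44u8]', B raises OverflowError; on convert_int_to_byte_vec(-10000): A returns 'vec![39u8, 16u8]', B raises OverflowError; on convert_int_to_byte_vec(-7): A raises ValueError, B raises OverflowError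
import Mathlib
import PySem

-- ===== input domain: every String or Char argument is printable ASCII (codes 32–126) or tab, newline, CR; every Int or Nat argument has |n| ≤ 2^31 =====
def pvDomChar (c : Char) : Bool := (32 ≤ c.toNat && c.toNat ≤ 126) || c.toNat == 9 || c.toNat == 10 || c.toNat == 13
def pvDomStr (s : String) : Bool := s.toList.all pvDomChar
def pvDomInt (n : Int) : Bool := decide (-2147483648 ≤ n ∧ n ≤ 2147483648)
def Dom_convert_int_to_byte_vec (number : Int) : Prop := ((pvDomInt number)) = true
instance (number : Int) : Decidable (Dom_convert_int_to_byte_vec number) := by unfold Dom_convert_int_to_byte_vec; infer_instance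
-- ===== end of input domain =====

-- B computes the big-endian bytes of the integer arithmetically (bit_length / to_bytes) instead of
-- building, zero-filling and slicing a binary digit string; alternative decomposition, same result.

-- ===== PORT A =====
-- literal transliteration of A: bin(number)[2:], int((len+7)/8), zfill, 8-char slices parsed with int(·, 2)
def convert_int_to_byte_vec (number : Int) : String :=
  let s : List Char := PySem.List.slice (PySem.Int.toBinChars0b number) (some 2) none  -- bin(number)[2:]
  let num_bytes : Int := PySem.Int.truncdiv ((s.length : Int) + 7) 8                   -- int((len(s) + 7) / 8); exact at these magnitudes
  let s2 : List Char := PySem.Chars.zfill s (num_bytes * 8)                            -- s.zfill(num_bytes * 8)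
  let byte_arr : List (List Char) :=
    (PySem.List.pyRange 0 num_bytes 1).map (fun i =>
      let byte := PySem.List.slice s2 (some (i * 8)) (some ((i + 1) * 8))              -- s[i*8 : (i+1)*8]
      let v := (PySem.Int.ofCharsBase? byte 2).getD 0                                  -- int(byte, 2); none = ValueError, only reachable for number < 0 (outside Pre_)
      PySem.Int.toChars v ++ "u8".toList)                                              -- str(i) + "u8"
  String.ofList ("vec![".toList ++ PySem.Chars.join ", ".toList byte_arr ++ "]".toList)

-- ===== PORT B =====
-- number.to_bytes(num_bytes, "big") as a structural recursion on the byte count (big-endian)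
def toBytesBE : Nat → Nat → List Nat
  | 0, _ => []
  | k + 1, n => toBytesBE k (n / 256) ++ [n % 256]

def convert_int_to_byte_vec_alt (number : Int) : String :=
  let num_bytes : Nat := max 1 ((PySem.Int.bitLength number + 7) / 8)   -- max(1, (number.bit_length() + 7) // 8)
  let bs : List Nat := toBytesBE num_bytes number.toNat                 -- number.to_bytes(num_bytes, "big"); OverflowError for number < 0 (outside Pre_)
  String.ofList ("vec![".toList ++
    PySem.Chars.join ", ".toList (bs.map (fun b => PySem.Int.toChars (Int.ofNat b) ++ "u8".toList)) ++ "]".toList)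

-- ===== PRECONDITION & SPEC =====
-- Pre_ excludes negative numbers, on which both programs raise for most values — B (to_bytes) raises
-- OverflowError on every negative input, A raises ValueError (int('b…', 2)) — except that A returns the
-- bytes of |number| when the zero-filled string happens to form a valid '0b…' literal (see cites).
def Pre_convert_int_to_byte_vec (number : Int) : Prop := 0 ≤ number
instance (number : Int) : Decidable (Pre_convert_int_to_byte_vec number) := by unfold Pre_convert_int_to_byte_vec; infer_instance
def pvWitness_convert_int_to_byte_vec : Int := (300)

def Spec_convert_int_to_byte_vec (number : Int) (out : String) : Prop := out = convert_int_to_byte_vec_alt number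
instance (number : Int) (out : String) : Decidable (Spec_convert_int_to_byte_vec number out) := by unfold Spec_convert_int_to_byte_vec; infer_instance

-- ===== CLAIM =====
def Claim_equal_convert_int_to_byte_vec : Prop := ∀ (number : Int), Dom_convert_int_to_byte_vec number → Pre_convert_int_to_byte_vec number → Spec_convert_int_to_byte_vec number (convert_int_to_byte_vec number)

-- ===== LEMMAS AND PROOFS =====

def pyDigits (n : Nat) : List Char :=
  if _ : n < 2 then [Nat.digitChar n] else pyDigits (n / 2) ++ [Nat.digitChar (n % 2)]
decreasing_by omega

lemma pyDigits_of_lt {n : Nat} (h : n < 2) : pyDigits n = [Nat.digitChar n] := by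
  rw [pyDigits]; simp [h]

lemma pyDigits_of_ge {n : Nat} (h : 2 ≤ n) : pyDigits n = pyDigits (n / 2) ++ [Nat.digitChar (n % 2)] := by
  rw [pyDigits]; simp [Nat.not_lt.2 h]

lemma toDigitsCore_eq_pyDigits : ∀ f n acc, n < f → Nat.toDigitsCore 2 f n acc = pyDigits n ++ acc := by
  intro f
  induction f with
  | zero => omega
  | succ f ih =>
    intro n acc hn
    rw [Nat.toDigitsCore]
    by_cases h : n / 2 = 0
    · have h2 : n < 2 := by omega
      simp [h, pyDigits_of_lt h2, Nat.mod_eq_of_lt h2]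
    · have h2 : 2 ≤ n := by omega
      simp only [h, if_false]
      rw [ih (n / 2) _ (by omega), pyDigits_of_ge h2]
      simp

lemma toDigits_eq_pyDigits (n : Nat) : Nat.toDigits 2 n = pyDigits n := by
  simpa using toDigitsCore_eq_pyDigits (n + 1) n [] (by omega)

lemma pyDigits_len (n : Nat) : (pyDigits n).length = max 1 (PySem.Int.bitLength (n : Int)) := by
  induction n using Nat.strong_induction_on with
  | _ n ih =>
    by_cases h : n < 2
    · interval_cases n
      · simp [pyDigits_of_lt, PySem.Int.bitLength_zero]
      · rw [pyDigits_of_lt (by omega)]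
        rw [show ((1:Nat):Int) = ((1:Nat):Int) from rfl, PySem.Int.bitLength_natCast (by omega)]
        simp [PySem.Int.bitLength_zero]
    · have h2 : 2 ≤ n := by omega
      rw [pyDigits_of_ge h2]
      have hbl := PySem.Int.bitLength_natCast (m := n) (by omega)
      have hbl2 := PySem.Int.bitLength_natCast (m := n / 2) (by omega)
      have := ih (n / 2) (by omega)
      simp only [List.length_append, List.length_cons, List.length_nil, this, hbl]
      omega

lemma pyDigits_mem (n : Nat) : ∀ c ∈ pyDigits n, c = '0' ∨ c = '1' := by
  induction n using Nat.strong_induction_on with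
  | _ n ih =>
    by_cases h : n < 2
    · rw [pyDigits_of_lt h]; interval_cases n <;> simp [Nat.digitChar]
    · rw [pyDigits_of_ge (by omega)]
      intro c hc
      rcases List.mem_append.1 hc with hc | hc
      · exact ih (n / 2) (by omega) c hc
      · simp at hc
        subst hc
        have : n % 2 = 0 ∨ n % 2 = 1 := by omega
        rcases this with h | h <;> simp [h, Nat.digitChar]

def recPad : Nat → Nat → List Char
  | 0, _ => []
  | b + 1, n => recPad b (n / 2) ++ [Nat.digitChar (n % 2)]

def padTo (l n : Nat) : List Char := List.replicate (l - (pyDigits n).length) '0' ++ pyDigits n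

lemma recPad_length (b n : Nat) : (recPad b n).length = b := by
  induction b generalizing n with
  | zero => rfl
  | succ b ih => simp [recPad, ih]

lemma recPad_mod (b n : Nat) : recPad b n = recPad b (n % 2 ^ b) := by
  induction b generalizing n with
  | zero => rfl
  | succ b ih =>
    have h1 : n % 2 ^ (b + 1) % 2 = n % 2 :=
      Nat.mod_mod_of_dvd n ⟨2 ^ b, by ring⟩
    have h2 : n % 2 ^ (b + 1) / 2 = n / 2 % 2 ^ b := by
      rw [pow_succ, mul_comm]
      exact Nat.mod_mul_right_div_self n 2 (2 ^ b)
    simp only [recPad, h1, h2]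
    rw [ih (n / 2)]

lemma padTo_succ (l n : Nat) (hl : 1 ≤ l) : padTo (l + 1) n = padTo l (n / 2) ++ [Nat.digitChar (n % 2)] := by
  by_cases h : n < 2
  · have hd : n / 2 = 0 := by omega
    have hm : n % 2 = n := by omega
    rw [padTo, padTo, pyDigits_of_lt h, hd, pyDigits_of_lt (by omega), hm]
    simp only [List.length_singleton]
    rw [show l + 1 - 1 = (l - 1) + 1 by omega, List.replicate_succ']
    simp [Nat.digitChar]
  · rw [padTo, padTo, pyDigits_of_ge (by omega)]
    simp only [List.length_append, List.length_singleton]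
    rw [show l + 1 - ((pyDigits (n / 2)).length + 1) = l - (pyDigits (n / 2)).length by omega]
    simp

lemma padTo_eq_recPad (b n : Nat) (hb : 1 ≤ b) (hn : n < 2 ^ b) : padTo b n = recPad b n := by
  induction b generalizing n with
  | zero => omega
  | succ b ih =>
    by_cases hb1 : b = 0
    · subst hb1
      have h2 : n < 2 := by simpa using hn
      have hm : n % 2 = n := by omega
      rw [padTo, pyDigits_of_lt h2]
      simp [recPad, hm]
    · rw [padTo_succ b n (by omega), ih (n / 2) (by omega) (by
        have : (2:Nat) ^ (b + 1) = 2 * 2 ^ b := by ring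
        omega)]
      rfl

lemma padTo_split (b a n : Nat) (ha : 1 ≤ a) (hn : n < 2 ^ (a + b)) :
    padTo (a + b) n = padTo a (n / 2 ^ b) ++ recPad b n := by
  induction b generalizing n with
  | zero => simp [recPad]
  | succ b ih =>
    have hpow : (2:Nat) ^ (a + (b + 1)) = 2 * 2 ^ (a + b) := by ring
    rw [show a + (b + 1) = (a + b) + 1 by omega, padTo_succ (a + b) n (by omega),
      ih (n / 2) (by omega)]
    have hdd : n / 2 / 2 ^ b = n / 2 ^ (b + 1) := by
      rw [Nat.div_div_eq_div_mul, pow_succ, mul_comm]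
    rw [hdd]
    simp [recPad]

lemma bitLength_le_of_lt {n l : Nat} (hn : n < 2 ^ l) : PySem.Int.bitLength (n : Int) ≤ l := by
  by_contra h
  push Not at h
  have h0 : (n : Int) ≠ 0 := by
    intro h0
    have hn0 : n = 0 := by exact_mod_cast h0
    subst hn0
    rw [show ((0:Nat):Int) = (0:Int) from rfl, PySem.Int.bitLength_zero] at h
    omega
  have h1 := PySem.Int.two_pow_bitLength_le (n : Int) h0
  have h2 : (2:Nat) ^ l ≤ 2 ^ (PySem.Int.bitLength (n:Int) - 1) :=
    Nat.pow_le_pow_right (by omega) (by omega)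
  simp only [Int.natAbs_natCast] at h1
  omega

lemma padTo_length (l n : Nat) (hn : n < 2 ^ l) (hl : 1 ≤ l) : (padTo l n).length = l := by
  have h1 := pyDigits_len n
  have h2 := bitLength_le_of_lt hn
  simp only [padTo, List.length_append, List.length_replicate]
  omega

lemma toBytesBE_lt (k m : Nat) : ∀ x ∈ toBytesBE k m, x < 256 := by
  induction k generalizing m with
  | zero => simp [toBytesBE]
  | succ k ih =>
    intro x hx
    rw [toBytesBE] at hx
    rcases List.mem_append.1 hx with h | h
    · exact ih (m / 256) x h
    · simp at h; omega

lemma truncdiv_nat (a : Nat) : PySem.Int.truncdiv ((a:Int) + 7) 8 = (((a + 7) / 8 : Nat) : Int) := by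
  rw [PySem.Int.truncdiv]
  push_cast
  rw [Int.tdiv_eq_ediv_of_nonneg (by positivity)]

lemma zfill_digits (cs : List Char) (w : Nat) (hhead : ∀ c ∈ cs, c = '0' ∨ c = '1') :
    PySem.Chars.zfill cs (w : Int) = List.replicate (w - cs.length) '0' ++ cs := by
  rw [PySem.Chars.zfill.eq_def]
  by_cases h : (w : Int) ≤ cs.length
  · rw [if_pos h]
    have : w - cs.length = 0 := by omega
    simp [this]
  · rw [if_neg h]
    cases cs with
    | nil => simp
    | cons c t =>
      have hc := hhead c (by simp)
      have : ¬ (c = '+' ∨ c = '-') := by rcases hc with h | h <;> simp [h]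
      simp only [this, if_false]
      simp

lemma A_s (m : Nat) :
    PySem.List.slice (PySem.Int.toBinChars0b (m : Int)) (some 2) none = pyDigits m := by
  rw [PySem.Int.toBinChars0b]
  rw [if_neg (by omega)]
  rw [show (2:Int) = ((2:Nat):Int) from rfl, PySem.List.slice_from_natCast]
  simp [toDigits_eq_pyDigits]


set_option maxHeartbeats 2000000 in
set_option maxRecDepth 10000 in
lemma parse_recPad : ∀ x : Fin 256, PySem.Int.ofCharsBase? (recPad 8 x.val) 2 = some (x.val : Int) := by decide

lemma main_chunks (k m : Nat) (hk : 1 ≤ k) (hm : m < 2 ^ (8 * k)) :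
    (List.range k).map (fun j => ((padTo (8 * k) m).drop (8 * j)).take 8) =
      (toBytesBE k m).map (fun b => recPad 8 b) := by
  induction k generalizing m with
  | zero => omega
  | succ k ih =>
    have h256 : (2:Nat) ^ 8 = 256 := by norm_num
    by_cases hk0 : k = 0
    · subst hk0
      rw [show (8:Nat) * (0 + 1) = 8 by omega] at hm ⊢
      rw [padTo_eq_recPad 8 m (by omega) hm]
      rw [show List.range (0 + 1) = [0] from rfl]
      simp only [List.map_cons, List.map_nil, toBytesBE, List.nil_append, Nat.mul_zero,
        List.drop_zero]
      rw [List.take_of_length_le (by rw [recPad_length]), recPad_mod 8 m, h256]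
    · have hk1 : 1 ≤ k := by omega
      have hsplit := padTo_split 8 (8 * k) m (by omega) (by
        rw [show 8 * k + 8 = 8 * (k + 1) by omega]; exact hm)
      rw [h256] at hsplit
      have hdiv : m / 256 < 2 ^ (8 * k) := by
        apply Nat.div_lt_of_lt_mul
        rw [← h256, ← pow_add, show 8 + 8 * k = 8 * (k + 1) by omega]
        exact hm
      have hlenP : (padTo (8 * k) (m / 256)).length = 8 * k :=
        padTo_length _ _ hdiv (by omega)
      rw [show 8 * (k + 1) = 8 * k + 8 by omega, hsplit]
      rw [List.range_succ, List.map_append,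
        show toBytesBE (k + 1) m = toBytesBE k (m / 256) ++ [m % 256] from rfl, List.map_append]
      congr 1
      · rw [← ih (m / 256) hk1 hdiv]
        apply List.map_congr_left
        intro j hj
        have hj' : j < k := List.mem_range.1 hj
        rw [List.drop_append_of_le_length (by omega),
          List.take_append_of_le_length (by rw [List.length_drop]; omega)]
      · simp only [List.map_cons, List.map_nil]
        set P := padTo (8 * k) (m / 256) with hP
        rw [show (8:Nat) * k = P.length from hlenP.symm]
        rw [List.drop_left, List.take_of_length_le (by rw [recPad_length])]
        rw [recPad_mod 8 m, h256]

theorem A_eq_B_of_nonneg (number : Int) (hpre : 0 ≤ number) :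
    convert_int_to_byte_vec number = convert_int_to_byte_vec_alt number := by
  lift number to Nat using hpre with m
  set L := (pyDigits m).length with hL
  set kN : Nat := (L + 7) / 8 with hkN
  have hL1 : 1 ≤ L := by
    rw [hL, pyDigits_len]; omega
  have hk1 : 1 ≤ kN := by omega
  have hLk : L ≤ 8 * kN := by omega
  have hbl : PySem.Int.bitLength (m : Int) ≤ L := by
    have := pyDigits_len m; omega
  have hm : m < 2 ^ (8 * kN) := by
    have h1 := PySem.Int.lt_two_pow_bitLength (m : Int)
    simp only [Int.natAbs_natCast] at h1
    calc m < 2 ^ PySem.Int.bitLength (m : Int) := h1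
      _ ≤ 2 ^ (8 * kN) := Nat.pow_le_pow_right (by omega) (by omega)
  rw [convert_int_to_byte_vec_alt, convert_int_to_byte_vec]
  have hmax : max 1 ((PySem.Int.bitLength ((m:Nat):Int) + 7) / 8) = kN := by
    have := pyDigits_len m; omega
  rw [hmax]
  simp only [A_s, Int.toNat_natCast]
  rw [show ((pyDigits m).length : Int) = (L : Int) from by rw [hL]]
  rw [truncdiv_nat L]
  congr 2
  rw [show ((kN : Int) * 8) = (((kN * 8 : Nat)) : Int) by push_cast; ring]
  rw [zfill_digits (pyDigits m) (kN * 8) (pyDigits_mem m)]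
  rw [show List.replicate (kN * 8 - (pyDigits m).length) '0' ++ pyDigits m = padTo (8 * kN) m from by
    rw [padTo, ← hL, Nat.mul_comm]]
  rw [PySem.List.pyRange_one]
  simp only [Int.sub_zero, Int.toNat_natCast, zero_add, List.map_map, Function.comp_def]
  rw [← hkN]
  have hmid : (List.range kN).map (fun j : Nat =>
        PySem.Int.toChars ((PySem.Int.ofCharsBase? (PySem.List.slice (padTo (8 * kN) m)
          (some ((j : Int) * 8)) (some (((j : Int) + 1) * 8))) 2).getD 0) ++ "u8".toList)
      = (toBytesBE kN m).map (fun b => PySem.Int.toChars (Int.ofNat b) ++ "u8".toList) := by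
    calc (List.range kN).map (fun j : Nat =>
          PySem.Int.toChars ((PySem.Int.ofCharsBase? (PySem.List.slice (padTo (8 * kN) m)
          (some ((j : Int) * 8)) (some (((j : Int) + 1) * 8))) 2).getD 0) ++ "u8".toList)
        = (List.range kN).map (fun j : Nat =>
          PySem.Int.toChars ((PySem.Int.ofCharsBase? (((padTo (8 * kN) m).drop (8 * j)).take 8) 2).getD 0)
          ++ "u8".toList) := by
          apply List.map_congr_left
          intro j hj
          rw [show ((j : Int) * 8) = (((8 * j : Nat)) : Int) by push_cast; ring,
          show (((j : Int) + 1) * 8) = (((8 * j + 8 : Nat)) : Int) by push_cast; ring,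
          PySem.List.slice_natCast]
          simp
    _ = ((List.range kN).map (fun j => ((padTo (8 * kN) m).drop (8 * j)).take 8)).map
          (fun byte => PySem.Int.toChars ((PySem.Int.ofCharsBase? byte 2).getD 0) ++ "u8".toList) := by
          simp only [List.map_map, Function.comp_def]
    _ = ((toBytesBE kN m).map (fun b => recPad 8 b)).map
          (fun byte => PySem.Int.toChars ((PySem.Int.ofCharsBase? byte 2).getD 0) ++ "u8".toList) := by
          rw [main_chunks kN m hk1 hm]
    _ = (toBytesBE kN m).map (fun b => PySem.Int.toChars (Int.ofNat b) ++ "u8".toList) := by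
          simp only [List.map_map, Function.comp_def]
          apply List.map_congr_left
          intro b hb
          rw [parse_recPad ⟨b, toBytesBE_lt kN m b hb⟩]
          rfl
  rw [hmid]

-- ===== VERDICT =====
theorem convert_int_to_byte_vec_spec : Claim_equal_convert_int_to_byte_vec := by
  intro number _ hpre
  exact A_eq_B_of_nonneg number hpre
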